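-- pv_equiv track=rewrite | github.com/albert-yakubov/py-practice | hackerrank/cutting_wood.py | boardCutting
-- ===== SOURCE A (Python) =====
-- def boardCutting(cost_y, cost_x):
--     m=len(cost_y) -1
--     n=len(cost_x) -1
--     cost_y.sort(reverse=True)
--     cost_x.sort(reverse=True)
--     xSeg = 1
--     ySeg = 1
--     i=0
--     j=0
--     cost=0
--     temp=0
--     while(xSeg<=m+1 and ySeg<=n+1):
--         if i<=m and j<=n:
--             if cost_y[i]>=cost_x[j] :
--                 temp=cost_y[i]*ySeg
--                 cost+=temp
--                 xSeg+=1
--                 i+=1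
--             else:
--                 if j<=n:
--                     temp=cost_x[j]*xSeg
--                     cost+=temp
--                     ySeg+=1
--                     j+=1
--         if i==m+1:
--             while(j<=n):
--                 temp=cost_x[j]*xSeg
--                 cost+=temp
--                 ySeg+=1
--                 j+=1
--         if j==n+1:
--             while(i<=m):
--                 temp=cost_y[i]*ySeg
--                 cost+=temp
--                 xSeg+=1
--                 i+=1
--     return cost%(10**9+7)
-- ===== SOURCE B (Python) =====
-- def boardCutting(cost_y, cost_x):
--     cost_y.sort(reverse=True)
--     cost_x.sort(reverse=True)
--     merged = sorted([(c, True) for c in cost_y] + [(c, False) for c in cost_x],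
--                     key=lambda t: t[0], reverse=True)
--     ySeg = 1
--     xSeg = 1
--     cost = 0
--     for c, is_y in merged:
--         if is_y:
--             cost += c * ySeg
--             xSeg += 1
--         else:
--             cost += c * xSeg
--             ySeg += 1
--     return cost % (10**9 + 7)
-- ===== Notes on version B (the rewrite author's own statement) =====
-- stated objective: simpler
-- what changed: Replaces A's two-index merge loop with its seg/index bookkeeping and two separate drain loops by one combined stable descending sort of all cuts tagged by axis followed by a single uniform fold.
-- intended difference: When exactly one of the two cut lists is empty, A's loop guard fails immediately and it returns 0, ignoring the other list's cuts; B returns the sum of those cuts (each at segment count 1) mod 10**9+7, which is the intended cost of making all required cuts. — e.g. on boardCutting([], [3]): A returns 0, B returns 3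
import Mathlib
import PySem

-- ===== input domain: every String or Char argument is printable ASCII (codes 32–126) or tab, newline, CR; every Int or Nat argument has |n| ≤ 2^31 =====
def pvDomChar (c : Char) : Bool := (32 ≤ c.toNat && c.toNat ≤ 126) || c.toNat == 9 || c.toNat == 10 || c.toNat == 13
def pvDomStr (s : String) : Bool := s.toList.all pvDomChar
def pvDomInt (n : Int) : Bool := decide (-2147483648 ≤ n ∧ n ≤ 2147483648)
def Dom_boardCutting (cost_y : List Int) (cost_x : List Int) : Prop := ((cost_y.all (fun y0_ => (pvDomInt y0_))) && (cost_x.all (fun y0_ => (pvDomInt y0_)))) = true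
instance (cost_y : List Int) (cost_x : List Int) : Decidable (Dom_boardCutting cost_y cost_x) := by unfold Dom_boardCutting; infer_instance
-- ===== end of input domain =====

-- B replaces A's two-index merge loop (with its drain loops) by one combined stable
-- descending sort of axis-tagged cuts and a single fold; equivalence is about the RETURN
-- value only (A sorts both argument lists in place; B performs the same in-place sorts).

-- ===== PORT A =====
-- inner `while(j<=n)` drain of A (returns the updated (ySeg, j, cost)); the Nat
-- argument of the worker is exactly the loop's remaining iteration count, so the
-- worker runs the very iterations Python runs.
def pvDrainJF (cx : List Int) (n : Int) : Nat → Int → Int → Int → Int → Int × Int × Int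
  | 0, _, ySeg, j, cost => (ySeg, j, cost)
  | fuel + 1, xSeg, ySeg, j, cost =>
    if j ≤ n then
      pvDrainJF cx n fuel xSeg (ySeg + 1) (j + 1) (cost + PySem.List.pyGetD cx j 0 * xSeg)
    else (ySeg, j, cost)

def pvDrainJ (cx : List Int) (n xSeg ySeg j cost : Int) : Int × Int × Int :=
  pvDrainJF cx n (n + 1 - j).toNat xSeg ySeg j cost

-- inner `while(i<=m)` drain of A (returns the updated (xSeg, i, cost))
def pvDrainIF (cy : List Int) (m : Int) : Nat → Int → Int → Int → Int → Int × Int × Int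
  | 0, xSeg, _, i, cost => (xSeg, i, cost)
  | fuel + 1, xSeg, ySeg, i, cost =>
    if i ≤ m then
      pvDrainIF cy m fuel (xSeg + 1) ySeg (i + 1) (cost + PySem.List.pyGetD cy i 0 * ySeg)
    else (xSeg, i, cost)

def pvDrainI (cy : List Int) (m xSeg ySeg i cost : Int) : Int × Int × Int :=
  pvDrainIF cy m (m + 1 - i).toNat xSeg ySeg i cost

-- the first `if i<=m and j<=n` block of A's loop body: updated (xSeg, ySeg, i, j, cost)
def pvStep1 (cy cx : List Int) (m n xSeg ySeg i j cost : Int) : Int × Int × Int × Int × Int :=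
  if i ≤ m ∧ j ≤ n then
    if PySem.List.pyGetD cy i 0 ≥ PySem.List.pyGetD cx j 0 then
      (xSeg + 1, ySeg, i + 1, j, cost + PySem.List.pyGetD cy i 0 * ySeg)
    else
      if j ≤ n then
        (xSeg, ySeg + 1, i, j + 1, cost + PySem.List.pyGetD cx j 0 * xSeg)
      else (xSeg, ySeg, i, j, cost)
  else (xSeg, ySeg, i, j, cost)

-- A's outer while loop; the fuel only makes the recursion total, A's loop always
-- terminates within the fuel the port passes.
def pvLoopA (cy cx : List Int) (m n : Int) : Nat → Int → Int → Int → Int → Int → Int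
  | 0, _, _, _, _, cost => cost
  | fuel + 1, xSeg, ySeg, i, j, cost =>
    if xSeg ≤ m + 1 ∧ ySeg ≤ n + 1 then
      let s1 := pvStep1 cy cx m n xSeg ySeg i j cost
      let x1 := s1.1
      let i1 := s1.2.2.1
      let s2 := if i1 = m + 1 then pvDrainJ cx n x1 s1.2.1 s1.2.2.2.1 s1.2.2.2.2
                else (s1.2.1, s1.2.2.2.1, s1.2.2.2.2)
      let y2 := s2.1
      let j2 := s2.2.1
      let s3 := if j2 = n + 1 then pvDrainI cy m x1 y2 i1 s2.2.2 else (x1, i1, s2.2.2)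
      pvLoopA cy cx m n fuel s3.1 y2 s3.2.1 j2 s3.2.2
    else cost

def boardCutting (cost_y : List Int) (cost_x : List Int) : Int :=
  let m : Int := (cost_y.length : Int) - 1
  let n : Int := (cost_x.length : Int) - 1
  let cy := PySem.List.sorted cost_y (fun v => v) true
  let cx := PySem.List.sorted cost_x (fun v => v) true
  PySem.Int.mod
    (pvLoopA cy cx m n (cost_y.length + cost_x.length + 1) 1 1 0 0 0)
    (10 ^ 9 + 7)

-- ===== PORT B =====
-- B's single fold over the tagged merged list (state ySeg, xSeg, cost)
def pvGoB : List (Int × Bool) → Int → Int → Int → Int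
  | [], _, _, cost => cost
  | (c, isY) :: rest, ySeg, xSeg, cost =>
    if isY then pvGoB rest ySeg (xSeg + 1) (cost + c * ySeg)
    else pvGoB rest (ySeg + 1) xSeg (cost + c * xSeg)

def boardCutting_alt (cost_y : List Int) (cost_x : List Int) : Int :=
  let cy := PySem.List.sorted cost_y (fun v => v) true
  let cx := PySem.List.sorted cost_x (fun v => v) true
  let merged := PySem.List.sorted
    (cy.map (fun c => (c, true)) ++ cx.map (fun c => (c, false)))
    (fun t => t.1) true
  PySem.Int.mod (pvGoB merged 1 1 0) (10 ^ 9 + 7)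

-- ===== PRECONDITION & SPEC =====
-- When exactly one of the two cut lists is empty, A's loop guard fails immediately and it
-- returns 0, ignoring the other list's cuts; B returns the sum of those cuts (each at
-- segment count 1) mod 10**9+7, which is the intended cost of making all required cuts.
def D_boardCutting (cost_y : List Int) (cost_x : List Int) : Prop :=
  (cost_y = [] ∧ cost_x ≠ []) ∨ (cost_x = [] ∧ cost_y ≠ [])
instance (cost_y : List Int) (cost_x : List Int) : Decidable (D_boardCutting cost_y cost_x) := by
  unfold D_boardCutting; infer_instance

def Spec_boardCutting (cost_y : List Int) (cost_x : List Int) (out : Int) : Prop :=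
  ¬ D_boardCutting cost_y cost_x → out = boardCutting_alt cost_y cost_x
instance (cost_y : List Int) (cost_x : List Int) (out : Int) : Decidable (Spec_boardCutting cost_y cost_x out) := by
  unfold Spec_boardCutting; infer_instance

def pvDiffWitness_boardCutting : List Int × List Int := ([], [3])
def pvDiffWitnessOut_boardCutting : Int × Int := (0, 3)

-- ===== CLAIM (what is proved, stated in full; the proofs are below) =====
def Claim_unchanged_boardCutting : Prop := ∀ (cost_y : List Int) (cost_x : List Int), Dom_boardCutting cost_y cost_x → Spec_boardCutting cost_y cost_x (boardCutting cost_y cost_x)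
def Claim_changed_boardCutting : Prop := Dom_boardCutting (pvDiffWitness_boardCutting.1) (pvDiffWitness_boardCutting.2) ∧ D_boardCutting (pvDiffWitness_boardCutting.1) (pvDiffWitness_boardCutting.2) ∧ boardCutting (pvDiffWitness_boardCutting.1) (pvDiffWitness_boardCutting.2) = pvDiffWitnessOut_boardCutting.1 ∧ boardCutting_alt (pvDiffWitness_boardCutting.1) (pvDiffWitness_boardCutting.2) = pvDiffWitnessOut_boardCutting.2 ∧ pvDiffWitnessOut_boardCutting.1 ≠ pvDiffWitnessOut_boardCutting.2

-- ===== LEMMAS AND PROOFS =====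

-- the greedy merge of two tagged lists: ties taken from the left (y) list, as A does
def pvMergeT : List (Int × Bool) → List (Int × Bool) → List (Int × Bool)
  | [], l2 => l2
  | a :: as, [] => a :: as
  | a :: as, b :: bs =>
    if b.1 ≤ a.1 then a :: pvMergeT as (b :: bs) else b :: pvMergeT (a :: as) bs

theorem pvMergeT_nil_right (l : List (Int × Bool)) : pvMergeT l [] = l := by
  cases l <;> simp [pvMergeT]

theorem pvMergeT_cons_ge (a : Int × Bool) (l bs : List (Int × Bool))
    (h : ∀ e ∈ bs, e.1 ≤ a.1) : pvMergeT (a :: l) bs = a :: pvMergeT l bs := by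
  cases bs with
  | nil => simp [pvMergeT_nil_right]
  | cons b bs' => simp [pvMergeT, h b (by simp)]

theorem pvInsertBy_pairwise (b : Int × Bool) (l : List (Int × Bool))
    (hl : l.Pairwise (fun p q => q.1 ≤ p.1)) :
    (PySem.List.insertBy (fun x y => decide (y.1 < x.1)) b l).Pairwise (fun p q => q.1 ≤ p.1) := by
  induction l with
  | nil => simp [PySem.List.insertBy]
  | cons a as ih =>
    rw [List.pairwise_cons] at hl
    by_cases hab : a.1 < b.1
    · rw [show PySem.List.insertBy (fun x y => decide (y.1 < x.1)) b (a :: as)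
          = b :: a :: as by simp [PySem.List.insertBy, hab]]
      refine List.pairwise_cons.2 ⟨?_, List.pairwise_cons.2 ⟨hl.1, hl.2⟩⟩
      intro e he
      rcases List.mem_cons.1 he with h1 | h2
      · exact le_of_lt (h1 ▸ hab)
      · exact le_trans (hl.1 e h2) (le_of_lt hab)
    · rw [show PySem.List.insertBy (fun x y => decide (y.1 < x.1)) b (a :: as)
          = a :: PySem.List.insertBy (fun x y => decide (y.1 < x.1)) b as by
            simp [PySem.List.insertBy, hab]]
      refine List.pairwise_cons.2 ⟨?_, ih hl.2⟩
      intro e he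
      rcases (PySem.List.mem_insertBy _ _ _ _).1 he with h1 | h2
      · exact h1 ▸ (not_lt.1 hab)
      · exact hl.1 e h2

theorem pvMergeT_insertBy (b : Int × Bool) (l1 bs : List (Int × Bool))
    (h1 : l1.Pairwise (fun p q => q.1 ≤ p.1)) (hbs : ∀ e ∈ bs, e.1 ≤ b.1) :
    pvMergeT (PySem.List.insertBy (fun x y => decide (y.1 < x.1)) b l1) bs
      = pvMergeT l1 (b :: bs) := by
  induction l1 with
  | nil =>
    simp only [PySem.List.insertBy]
    rw [pvMergeT_cons_ge b [] bs hbs]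
    simp [pvMergeT]
  | cons a as ih =>
    rw [List.pairwise_cons] at h1
    by_cases hab : a.1 < b.1
    · rw [show PySem.List.insertBy (fun x y => decide (y.1 < x.1)) b (a :: as)
          = b :: a :: as by simp [PySem.List.insertBy, hab]]
      rw [pvMergeT_cons_ge b (a :: as) bs hbs]
      have : pvMergeT (a :: as) (b :: bs) = b :: pvMergeT (a :: as) bs := by
        simp [pvMergeT, not_le.2 hab]
      rw [this]
    · rw [show PySem.List.insertBy (fun x y => decide (y.1 < x.1)) b (a :: as)
          = a :: PySem.List.insertBy (fun x y => decide (y.1 < x.1)) b as by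
            simp [PySem.List.insertBy, hab]]
      have hge : ∀ e ∈ bs, e.1 ≤ a.1 := fun e he => le_trans (hbs e he) (not_lt.1 hab)
      rw [pvMergeT_cons_ge a _ bs hge, ih h1.2]
      have hba : b.1 ≤ a.1 := not_lt.1 hab
      simp [pvMergeT, hba]

theorem pvFoldl_insertBy_merge (bs l1 : List (Int × Bool))
    (h1 : l1.Pairwise (fun p q => q.1 ≤ p.1)) (hbs : bs.Pairwise (fun p q => q.1 ≤ p.1)) :
    bs.foldl (fun acc x => PySem.List.insertBy (fun a b => decide (b.1 < a.1)) x acc) l1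
      = pvMergeT l1 bs := by
  induction bs generalizing l1 with
  | nil => simp [pvMergeT_nil_right]
  | cons b bs' ih =>
    rw [List.pairwise_cons] at hbs
    simp only [List.foldl_cons]
    rw [ih _ (pvInsertBy_pairwise b l1 h1) hbs.2,
        pvMergeT_insertBy b l1 bs' h1 hbs.1]

theorem pvSorted_append_merge (l1 l2 : List (Int × Bool))
    (h1 : l1.Pairwise (fun p q => q.1 ≤ p.1)) (h2 : l2.Pairwise (fun p q => q.1 ≤ p.1)) :
    PySem.List.sorted (l1 ++ l2) (fun t => t.1) true = pvMergeT l1 l2 := by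
  rw [PySem.List.sorted_rev_eq_foldl_insertBy, List.foldl_append]
  have : l1.foldl (fun acc x => PySem.List.insertBy (fun a b => decide (b.1 < a.1)) x acc) []
      = l1 := by
    rw [← PySem.List.sorted_rev_eq_foldl_insertBy]
    exact PySem.List.sorted_rev_eq_self_of_pairwise l1 (fun t => t.1) h1
  rw [this]
  exact pvFoldl_insertBy_merge l2 l1 h1 h2

theorem pvDrainJ_stop (cx : List Int) (n X Y j c : Int) (h : ¬ j ≤ n) :
    pvDrainJ cx n X Y j c = (Y, j, c) := by
  unfold pvDrainJ
  rcases hk : (n + 1 - j).toNat with _ | k <;> simp [pvDrainJF, h]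

theorem pvDrainJ_step (cx : List Int) (n X Y j c : Int) (h : j ≤ n) :
    pvDrainJ cx n X Y j c
      = pvDrainJ cx n X (Y + 1) (j + 1) (c + PySem.List.pyGetD cx j 0 * X) := by
  unfold pvDrainJ
  rw [show (n + 1 - j).toNat = (n + 1 - (j + 1)).toNat + 1 by omega]
  simp [pvDrainJF, h]

theorem pvDrainI_stop (cy : List Int) (m X Y i c : Int) (h : ¬ i ≤ m) :
    pvDrainI cy m X Y i c = (X, i, c) := by
  unfold pvDrainI
  rcases hk : (m + 1 - i).toNat with _ | k <;> simp [pvDrainIF, h]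

theorem pvDrainI_step (cy : List Int) (m X Y i c : Int) (h : i ≤ m) :
    pvDrainI cy m X Y i c
      = pvDrainI cy m (X + 1) Y (i + 1) (c + PySem.List.pyGetD cy i 0 * Y) := by
  unfold pvDrainI
  rw [show (m + 1 - i).toNat = (m + 1 - (i + 1)).toNat + 1 by omega]
  simp [pvDrainIF, h]

theorem pvDrainJ_spec (cx : List Int) (k : Nat) :
    ∀ (q : Nat), cx.length = q + k → ∀ (X Y c : Int),
    pvDrainJ cx ((cx.length : Int) - 1) X Y (q : Int) c
      = (Y + (k : Int), (cx.length : Int),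
         pvGoB ((cx.drop q).map (fun v => (v, false))) Y X c) := by
  induction k with
  | zero =>
    intro q hq X Y c
    rw [pvDrainJ_stop cx _ X Y _ c (show ¬((q : Int) ≤ (cx.length : Int) - 1) by omega)]
    rw [List.drop_of_length_le (show cx.length ≤ q by omega)]
    simp [pvGoB, hq]
  | succ k ih =>
    intro q hq X Y c
    have hqlt : q < cx.length := by omega
    rw [pvDrainJ_step cx _ X Y _ c (show (q : Int) ≤ (cx.length : Int) - 1 by omega)]
    have hget : PySem.List.pyGetD cx (q : Int) 0 = cx[q] := by
      rw [PySem.List.pyGetD_natCast, List.getD_eq_getElem cx 0 hqlt]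
    have hcast : ((q : Int) + 1) = ((q + 1 : Nat) : Int) := by push_cast; ring
    rw [hget, hcast, ih (q + 1) (by omega) X (Y + 1) (c + cx[q] * X)]
    rw [List.drop_eq_getElem_cons hqlt]
    simp only [List.map_cons, pvGoB, if_neg Bool.false_ne_true]
    rw [show Y + 1 + (k : Int) = Y + ((k + 1 : Nat) : Int) by push_cast; ring]

theorem pvDrainI_spec (cy : List Int) (k : Nat) :
    ∀ (p : Nat), cy.length = p + k → ∀ (X Y c : Int),
    pvDrainI cy ((cy.length : Int) - 1) X Y (p : Int) c
      = (X + (k : Int), (cy.length : Int),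
         pvGoB ((cy.drop p).map (fun v => (v, true))) Y X c) := by
  induction k with
  | zero =>
    intro p hp X Y c
    rw [pvDrainI_stop cy _ X Y _ c (show ¬((p : Int) ≤ (cy.length : Int) - 1) by omega)]
    rw [List.drop_of_length_le (show cy.length ≤ p by omega)]
    simp [pvGoB, hp]
  | succ k ih =>
    intro p hp X Y c
    have hplt : p < cy.length := by omega
    rw [pvDrainI_step cy _ X Y _ c (show (p : Int) ≤ (cy.length : Int) - 1 by omega)]
    have hget : PySem.List.pyGetD cy (p : Int) 0 = cy[p] := by
      rw [PySem.List.pyGetD_natCast, List.getD_eq_getElem cy 0 hplt]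
    have hcast : ((p : Int) + 1) = ((p + 1 : Nat) : Int) := by push_cast; ring
    rw [hget, hcast, ih (p + 1) (by omega) (X + 1) Y (c + cy[p] * Y)]
    rw [List.drop_eq_getElem_cons hplt,
        show X + 1 + (k : Int) = X + ((k + 1 : Nat) : Int) by push_cast; ring]
    simp only [List.map_cons, pvGoB, if_pos trivial]

theorem pvMergeT_cons_left (a b : Int × Bool) (as bs : List (Int × Bool)) (h : b.1 ≤ a.1) :
    pvMergeT (a :: as) (b :: bs) = a :: pvMergeT as (b :: bs) := by
  simp [pvMergeT, h]

theorem pvMergeT_cons_right (a b : Int × Bool) (as bs : List (Int × Bool)) (h : ¬ b.1 ≤ a.1) :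
    pvMergeT (a :: as) (b :: bs) = b :: pvMergeT (a :: as) bs := by
  simp [pvMergeT, h]

theorem pvGoB_cons_true (c : Int) (L : List (Int × Bool)) (Y X cost : Int) :
    pvGoB ((c, true) :: L) Y X cost = pvGoB L Y (X + 1) (cost + c * Y) := by
  simp [pvGoB]

theorem pvGoB_cons_false (c : Int) (L : List (Int × Bool)) (Y X cost : Int) :
    pvGoB ((c, false) :: L) Y X cost = pvGoB L (Y + 1) X (cost + c * X) := by
  simp [pvGoB]

theorem pvLoopA_eq (cy cx : List Int) :
    ∀ (fuel : Nat) (p q : Nat) (cost : Int), p ≤ cy.length → q ≤ cx.length →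
    (cy.length - p) + (cx.length - q) + 1 ≤ fuel →
    pvLoopA cy cx ((cy.length : Int) - 1) ((cx.length : Int) - 1) fuel
      ((p : Int) + 1) ((q : Int) + 1) (p : Int) (q : Int) cost
      = if p < cy.length ∧ q < cx.length
        then pvGoB (pvMergeT ((cy.drop p).map (fun v => (v, true)))
                             ((cx.drop q).map (fun v => (v, false))))
               ((q : Int) + 1) ((p : Int) + 1) cost
        else cost := by
  intro fuel
  induction fuel with
  | zero => intro p q cost hp hq hf; omega
  | succ fuel ih =>
    intro p q cost hp hq hf
    by_cases hC : p < cy.length ∧ q < cx.length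
    · obtain ⟨hp', hq'⟩ := hC
      rw [if_pos ⟨hp', hq'⟩]
      have hA : PySem.List.pyGetD cy (p : Int) 0 = cy[p] := by
        rw [PySem.List.pyGetD_natCast, List.getD_eq_getElem cy 0 hp']
      have hB : PySem.List.pyGetD cx (q : Int) 0 = cx[q] := by
        rw [PySem.List.pyGetD_natCast, List.getD_eq_getElem cx 0 hq']
      rw [pvLoopA,
        if_pos (show (p : Int) + 1 ≤ (cy.length : Int) - 1 + 1 ∧
                     (q : Int) + 1 ≤ (cx.length : Int) - 1 + 1 by omega)]
      by_cases hab : PySem.List.pyGetD cy (p : Int) 0 ≥ PySem.List.pyGetD cx (q : Int) 0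
      · -- A takes the y cut
        have hstep : pvStep1 cy cx ((cy.length : Int) - 1) ((cx.length : Int) - 1)
            ((p : Int) + 1) ((q : Int) + 1) (p : Int) (q : Int) cost
            = ((p : Int) + 1 + 1, (q : Int) + 1, (p : Int) + 1, (q : Int),
               cost + cy[p] * ((q : Int) + 1)) := by
          rw [pvStep1,
            if_pos (show (p : Int) ≤ (cy.length : Int) - 1 ∧
                         (q : Int) ≤ (cx.length : Int) - 1 by omega),
            if_pos hab, hA]
        rw [hstep]
        have hba : cx[q] ≤ cy[p] := by rw [hA, hB] at hab; exact hab
        by_cases hpe : p + 1 = cy.length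
        · -- y side exhausted: the j-drain fires
          dsimp only
          rw [if_pos (show (p : Int) + 1 = (cy.length : Int) - 1 + 1 by omega)]
          rw [pvDrainJ_spec cx (cx.length - q) q (by omega) ((p : Int) + 1 + 1)
              ((q : Int) + 1) (cost + cy[p] * ((q : Int) + 1))]
          dsimp only
          rw [if_pos (show (cx.length : Int) = (cx.length : Int) - 1 + 1 by ring)]
          rw [pvDrainI_stop cy _ _ _ _ _ (show ¬((p : Int) + 1 ≤ (cy.length : Int) - 1) by omega)]
          dsimp only
          cases fuel with
          | zero => omega
          | succ f =>
            rw [pvLoopA,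
              if_neg (show ¬((p : Int) + 1 + 1 ≤ (cy.length : Int) - 1 + 1 ∧
                (q : Int) + 1 + (↑(cx.length - q) : Int) ≤ (cx.length : Int) - 1 + 1) by omega)]
            rw [List.drop_eq_getElem_cons hp', List.drop_eq_getElem_cons hq',
              List.map_cons, List.map_cons,
              List.drop_of_length_le (show cy.length ≤ p + 1 by omega), List.map_nil,
              pvMergeT_cons_left _ _ _ _ hba, pvMergeT]
            rw [pvGoB_cons_true]
        · -- y side not exhausted: no drains, loop again
          dsimp only
          rw [if_neg (show ¬((p : Int) + 1 = (cy.length : Int) - 1 + 1) by omega)]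
          dsimp only
          rw [if_neg (show ¬((q : Int) = (cx.length : Int) - 1 + 1) by omega)]
          dsimp only
          have hrec := ih (p + 1) q (cost + cy[p] * ((q : Int) + 1))
            (by omega) (by omega) (by omega)
          push_cast at hrec
          rw [hrec, if_pos ⟨by omega, hq'⟩]
          rw [List.drop_eq_getElem_cons hp', List.drop_eq_getElem_cons hq',
            List.map_cons, List.map_cons, pvMergeT_cons_left _ _ _ _ hba,
            pvGoB_cons_true]
      · -- A takes the x cut
        have hstep : pvStep1 cy cx ((cy.length : Int) - 1) ((cx.length : Int) - 1)
            ((p : Int) + 1) ((q : Int) + 1) (p : Int) (q : Int) cost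
            = ((p : Int) + 1, (q : Int) + 1 + 1, (p : Int), (q : Int) + 1,
               cost + cx[q] * ((p : Int) + 1)) := by
          rw [pvStep1,
            if_pos (show (p : Int) ≤ (cy.length : Int) - 1 ∧
                         (q : Int) ≤ (cx.length : Int) - 1 by omega),
            if_neg hab,
            if_pos (show (q : Int) ≤ (cx.length : Int) - 1 by omega), hB]
        rw [hstep]
        have hba : ¬ cx[q] ≤ cy[p] := by rw [hA, hB] at hab; exact hab
        dsimp only
        rw [if_neg (show ¬((p : Int) = (cy.length : Int) - 1 + 1) by omega)]
        dsimp only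
        by_cases hqe : q + 1 = cx.length
        · -- x side exhausted: the i-drain fires
          rw [if_pos (show (q : Int) + 1 = (cx.length : Int) - 1 + 1 by omega)]
          rw [pvDrainI_spec cy (cy.length - p) p (by omega) ((p : Int) + 1)
              ((q : Int) + 1 + 1) (cost + cx[q] * ((p : Int) + 1))]
          dsimp only
          cases fuel with
          | zero => omega
          | succ f =>
            rw [pvLoopA,
              if_neg (show ¬((p : Int) + 1 + (↑(cy.length - p) : Int) ≤ (cy.length : Int) - 1 + 1 ∧
                (q : Int) + 1 + 1 ≤ (cx.length : Int) - 1 + 1) by omega)]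
            rw [List.drop_eq_getElem_cons hp', List.drop_eq_getElem_cons hq',
              List.map_cons, List.map_cons,
              List.drop_of_length_le (show cx.length ≤ q + 1 by omega), List.map_nil,
              pvMergeT_cons_right _ _ _ _ hba, pvMergeT_nil_right]
            rw [pvGoB_cons_false]
        · -- x side not exhausted: no drains, loop again
          rw [if_neg (show ¬((q : Int) + 1 = (cx.length : Int) - 1 + 1) by omega)]
          dsimp only
          have hrec := ih p (q + 1) (cost + cx[q] * ((p : Int) + 1))
            (by omega) (by omega) (by omega)
          push_cast at hrec
          rw [hrec, if_pos ⟨hp', by omega⟩]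
          rw [List.drop_eq_getElem_cons hp', List.drop_eq_getElem_cons hq',
            List.map_cons, List.map_cons, pvMergeT_cons_right _ _ _ _ hba,
            pvGoB_cons_false]
    · rw [if_neg hC, pvLoopA, if_neg (by omega)]

theorem boardCutting_eq_main (cost_y cost_x : List Int) :
    ¬ D_boardCutting cost_y cost_x →
    boardCutting cost_y cost_x = boardCutting_alt cost_y cost_x := by
  intro hnd
  by_cases hy : cost_y = []
  · have hx : cost_x = [] := by
      by_contra hne; exact hnd (Or.inl ⟨hy, hne⟩)
    subst hy; subst hx; rfl
  · have hx : cost_x ≠ [] := by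
      intro hne
      exact hnd (Or.inr ⟨hne, hy⟩)
    simp only [boardCutting, boardCutting_alt]
    have hly : (PySem.List.sorted cost_y (fun v => v) true).length = cost_y.length :=
      PySem.List.length_sorted cost_y (fun v => v) true
    have hlx : (PySem.List.sorted cost_x (fun v => v) true).length = cost_x.length :=
      PySem.List.length_sorted cost_x (fun v => v) true
    have hmain := pvLoopA_eq (PySem.List.sorted cost_y (fun v => v) true)
      (PySem.List.sorted cost_x (fun v => v) true)
      (cost_y.length + cost_x.length + 1) 0 0 0
      (by omega) (by omega) (by omega)
    rw [hly, hlx] at hmain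
    norm_num at hmain
    rw [hmain, if_pos ⟨List.length_pos_of_ne_nil hy, List.length_pos_of_ne_nil hx⟩]
    have hpy : ((PySem.List.sorted cost_y (fun v => v) true).map
        (fun c => (c, true))).Pairwise (fun p q : Int × Bool => q.1 ≤ p.1) := by
      rw [List.pairwise_map]
      exact PySem.List.sorted_pairwise_rev cost_y (fun v => v)
    have hpx : ((PySem.List.sorted cost_x (fun v => v) true).map
        (fun c => (c, false))).Pairwise (fun p q : Int × Bool => q.1 ≤ p.1) := by
      rw [List.pairwise_map]
      exact PySem.List.sorted_pairwise_rev cost_x (fun v => v)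
    rw [pvSorted_append_merge _ _ hpy hpx]

-- ===== VERDICT (by name: the statement is the Claim_ definition above) =====
theorem boardCutting_spec : Claim_unchanged_boardCutting := by
  intro cost_y cost_x _ hnd
  exact boardCutting_eq_main cost_y cost_x hnd

theorem boardCutting_changed : Claim_changed_boardCutting := by
  unfold Claim_changed_boardCutting; decide
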